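-- pv_equiv track=rewrite | github.com/google-research/e3x | e3x/matrix/matmat.py | make_dict_irreps_mult
-- ===== SOURCE A (Python) =====
-- import collections
-- import itertools
-- from typing import Any, Dict, List, Sequence, Tuple, Optional, Union
--
-- def make_dict_irreps_mult(
--     degrees: Sequence[int], max_degree: Optional[int] = None
-- ) -> Dict[int, int]:
--   r"""Compute multiplicities of irreducibles in matrix space.
--
--   For :math:`V = (\ell=ls[0]) \oplus ... \oplus (\ell=ls[-1])` compute the
--   number of irreducible components of :math:`V \otimes V` with a given
--   :math:`\ell`.
--   Make dictionary :math:`\ell\to` Number irreps with this :math:`\ell`,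
--   up to :math:`\ell\leq` ``max_degree``
--
--   Args:
--     degrees: e.g. [0,1,1,2]  for 16 matrices of size {1,3,3,5} :math:`\times`
--       {1,3,3,5}.
--     max_degree:  Maximal :math:`l` to use in these matrices
--
--   Returns:
--     dictionary :math:`\ell\to` Number irreps with this :math:`\ell`
--   """
--   result = collections.defaultdict(int)
--   for la, lb in itertools.product(degrees, degrees):
--     max_l = la + lb if max_degree is None else min(la + lb, max_degree)
--     for l in range(abs(la - lb), max_l + 1):
--       result[l] += 1
--   return result
-- ===== SOURCE B (Python) =====
-- import collections
--
--
-- def make_dict_irreps_mult(degrees, max_degree=None):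
--   # Collapse duplicate degrees: iterate over distinct-value pairs once,
--   # weighting each interval contribution by the product of frequencies.
--   cnt = collections.Counter(degrees)
--   distinct = list(cnt)
--   result = collections.defaultdict(int)
--   for a in distinct:
--     for b in distinct:
--       m = cnt[a] * cnt[b]
--       hi = a + b if max_degree is None else min(a + b, max_degree)
--       for l in range(abs(a - b), hi + 1):
--         result[l] += m
--   return result
-- ===== Notes on version B (the rewrite author's own statement) =====
-- stated objective: alternative
-- what changed: B collapses duplicate degrees with a Counter and iterates only over distinct-value pairs, weighting each interval contribution by the product of the two frequencies, instead of looping over all n*n element pairs; this trades a per-pair count product for an outer loop that is quadratic in the number of distinct degrees rather than in the list length.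
import Mathlib
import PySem

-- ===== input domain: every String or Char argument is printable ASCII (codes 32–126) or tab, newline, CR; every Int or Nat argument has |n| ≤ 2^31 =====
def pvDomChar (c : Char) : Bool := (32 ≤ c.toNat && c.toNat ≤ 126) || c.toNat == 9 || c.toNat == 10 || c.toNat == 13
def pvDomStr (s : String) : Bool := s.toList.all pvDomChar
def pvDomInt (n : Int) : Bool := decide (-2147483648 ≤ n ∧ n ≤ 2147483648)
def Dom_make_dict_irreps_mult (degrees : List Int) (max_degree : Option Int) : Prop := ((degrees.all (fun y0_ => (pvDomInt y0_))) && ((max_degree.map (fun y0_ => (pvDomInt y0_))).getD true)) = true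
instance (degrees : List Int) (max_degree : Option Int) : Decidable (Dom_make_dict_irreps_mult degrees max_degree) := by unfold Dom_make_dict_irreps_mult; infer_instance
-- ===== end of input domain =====

-- B collapses duplicate degrees via a Counter and iterates distinct-value pairs with
-- frequency-product weights instead of all n×n element pairs (objective: alternative).

-- ===== PORT A =====
-- 'range(abs(la - lb), max_l + 1)' with 'max_l = la + lb if max_degree is None else min(la + lb, max_degree)'
-- (the identical two lines appear in both Pythons; shared transliterated helper)
def pvRng (max_degree : Option Int) (a b : Int) : List Int :=
  PySem.List.pyRange |a - b|
    ((match max_degree with | none => a + b | some md => min (a + b) md) + 1) 1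

def make_dict_irreps_mult (degrees : List Int) (max_degree : Option Int) : List (Int × Int) :=
  -- result = defaultdict(int); for la, lb in product(degrees, degrees): for l in range(...): result[l] += 1
  let pairs := degrees.flatMap (fun la => degrees.map (fun lb => (la, lb)))
  let result : PySem.Dict Int Int :=
    pairs.foldl
      (fun result p =>
        (pvRng max_degree p.1 p.2).foldl (fun result l => result.modify l 0 (· + 1)) result)
      PySem.Dict.empty
  result.items

-- ===== PORT B =====
def make_dict_irreps_mult_alt (degrees : List Int) (max_degree : Option Int) : List (Int × Int) :=
  -- cnt = Counter(degrees); distinct = list(cnt); result = defaultdict(int);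
  -- nested loops over distinct with m = cnt[a]*cnt[b]; result[l] += m
  let cnt : PySem.Dict Int Int := PySem.Dict.counter degrees
  let distinct := cnt.keys
  let result : PySem.Dict Int Int :=
    distinct.foldl
      (fun result a =>
        distinct.foldl
          (fun result b =>
            (pvRng max_degree a b).foldl
              (fun result l => result.modify l 0 (· + cnt.getD a 0 * cnt.getD b 0))
              result)
          result)
      PySem.Dict.empty
  result.items

-- ===== PRECONDITION & SPEC =====
def Spec_make_dict_irreps_mult (degrees : List Int) (max_degree : Option Int) (out : List (Int × Int)) : Prop := out = make_dict_irreps_mult_alt degrees max_degree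
instance (degrees : List Int) (max_degree : Option Int) (out : List (Int × Int)) : Decidable (Spec_make_dict_irreps_mult degrees max_degree out) := by unfold Spec_make_dict_irreps_mult; infer_instance

-- ===== CLAIM (what is proved, stated in full; the proofs are below) =====
def Claim_equal_make_dict_irreps_mult : Prop := ∀ (degrees : List Int) (max_degree : Option Int), Dom_make_dict_irreps_mult degrees max_degree → Spec_make_dict_irreps_mult degrees max_degree (make_dict_irreps_mult degrees max_degree)

-- ===== LEMMAS AND PROOFS =====

def pvSU {α β : Type} [BEq β] (f : α → List β) (l : List α) (s : PySem.Set β) : PySem.Set β :=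
  l.foldl (fun s a => PySem.Set.update s (f a)) s

theorem pvSU_eq_update {α β : Type} [BEq β] (f : α → List β) (l : List α) (s : PySem.Set β) :
    pvSU f l s = PySem.Set.update s (l.flatMap f) := by
  induction l generalizing s with
  | nil => simp [pvSU, PySem.Set.update]
  | cons x l ih => simp [pvSU, List.flatMap_cons, PySem.Set.update_append] at *; rw [ih]

theorem pv_update_self {β : Type} [BEq β] [LawfulBEq β] (s : PySem.Set β) (L : List β)
    (h : ∀ y ∈ L, y ∈ s) : PySem.Set.update s L = s := by
  induction L generalizing s with
  | nil => simp [PySem.Set.update]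
  | cons x L ih =>
      rw [PySem.Set.update_cons, PySem.Set.add_of_mem (h x (by simp))]
      exact ih s (fun y hy => h y (by simp [hy]))
theorem pv_mem_pvSU {α β : Type} [BEq β] [LawfulBEq β] (f : α → List β) (l : List α)
    (s : PySem.Set β) (y : β) : y ∈ pvSU f l s ↔ y ∈ s ∨ ∃ a ∈ l, y ∈ f a := by
  rw [pvSU_eq_update, PySem.Set.mem_update]
  simp [List.mem_flatMap]

theorem pvSU_ofList {α β : Type} [BEq α] [LawfulBEq α] [BEq β] [LawfulBEq β]
    (f : α → List β) (l : List α) :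
    pvSU f l PySem.Set.empty = pvSU f (PySem.Set.ofList l) PySem.Set.empty := by
  induction l using List.reverseRecOn with
  | nil => simp
  | append_singleton l x ih =>
      rw [PySem.Set.ofList_append_singleton]
      by_cases hx : x ∈ PySem.Set.ofList l
      · rw [PySem.Set.add_of_mem hx]
        have hxl : x ∈ l := (PySem.Set.mem_ofList _ _).1 hx
        rw [show pvSU f (l ++ [x]) PySem.Set.empty
              = PySem.Set.update (pvSU f l PySem.Set.empty) (f x) by
            simp [pvSU, List.foldl_append]]
        rw [pv_update_self _ _ (fun y hy => (pv_mem_pvSU f l _ y).2 (Or.inr ⟨x, hxl, hy⟩))]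
        exact ih
      · rw [PySem.Set.add_of_not_mem hx]
        rw [show pvSU f (l ++ [x]) PySem.Set.empty
              = PySem.Set.update (pvSU f l PySem.Set.empty) (f x) by
            simp [pvSU, List.foldl_append]]
        rw [show pvSU f (PySem.Set.ofList l ++ [x]) PySem.Set.empty
              = PySem.Set.update (pvSU f (PySem.Set.ofList l) PySem.Set.empty) (f x) by
            simp [pvSU, List.foldl_append]]
        rw [ih]
theorem pv_ofList_map_inj {α β : Type} [BEq α] [LawfulBEq α] [BEq β] [LawfulBEq β]
    (f : α → β) (hf : Function.Injective f) (l : List α) :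
    PySem.Set.ofList (l.map f) = (PySem.Set.ofList l).map f := by
  induction l using List.reverseRecOn with
  | nil => simp
  | append_singleton l x ih =>
      rw [List.map_append, List.map_singleton, PySem.Set.ofList_append_singleton,
        PySem.Set.ofList_append_singleton]
      by_cases hx : x ∈ PySem.Set.ofList l
      · rw [PySem.Set.add_of_mem hx, PySem.Set.add_of_mem (by
          rw [ih] at *; exact List.mem_map_of_mem hx), ih]
      · rw [PySem.Set.add_of_not_mem hx, PySem.Set.add_of_not_mem (by
          rw [ih]; intro hc; rcases List.mem_map.1 hc with ⟨y, hy, hyx⟩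
          exact hx (hf hyx ▸ hy)), List.map_append, ih, List.map_singleton]
theorem pv_ofList_flatMap_tagged {α : Type} [BEq α] [LawfulBEq α] [BEq (α × α)] [LawfulBEq (α × α)]
    (m h : List α) (hm : m.Nodup) :
    PySem.Set.ofList (m.flatMap (fun a => h.map (fun b => (a, b)))) =
      m.flatMap (fun a => PySem.Set.ofList (h.map (fun b => (a, b)))) := by
  induction m with
  | nil => simp
  | cons x m ih =>
      rw [List.flatMap_cons, PySem.Set.ofList_append, PySem.Set.update_eq_append_filter,
        List.flatMap_cons]
      have hnd : m.Nodup := hm.of_cons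
      rw [ih hnd]
      congr 1
      apply List.filter_eq_self.2
      intro y hy
      rcases List.mem_flatMap.1 hy with ⟨b, hb, hyb⟩
      have hy1 : y.1 = b := by
        rcases List.mem_map.1 ((PySem.Set.mem_ofList _ _).1 hyb) with ⟨c, _, hc⟩
        simp [← hc]
      have hbx : b ≠ x := by rintro rfl; exact (List.nodup_cons.1 hm).1 hb
      simp only [Bool.not_eq_eq_eq_not, Bool.not_true]
      have : y ∉ PySem.Set.ofList (h.map (fun c => (x, c))) := by
        intro hc
        rcases List.mem_map.1 ((PySem.Set.mem_ofList _ _).1 hc) with ⟨c, _, hc2⟩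
        apply hbx; rw [← hy1, ← hc2]
      simpa [PySem.Set.contains_iff] using this
def pvPairs {α : Type} (xs : List α) : List (α × α) :=
  xs.flatMap (fun a => xs.map (fun b => (a, b)))

theorem pv_ofList_pairs {α : Type} [BEq α] [LawfulBEq α] [BEq (α × α)] [LawfulBEq (α × α)]
    (l : List α) : PySem.Set.ofList (pvPairs l) = pvPairs (PySem.Set.ofList l) := by
  have h1 : ∀ (f : α → List (α × α)) (xs : List α),
      PySem.Set.ofList (xs.flatMap f) = pvSU f xs PySem.Set.empty := by
    intro f xs
    rw [pvSU_eq_update, ← PySem.Set.update_nil_left]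
    rfl
  rw [pvPairs, h1, pvSU_ofList, ← h1,
    pv_ofList_flatMap_tagged _ _ (PySem.Set.nodup_ofList l)]
  unfold pvPairs
  apply List.flatMap_congr
  intro a _
  rw [pv_ofList_map_inj _ (fun x y hxy => by simpa using hxy)]
theorem pv_count_flatMap {α β : Type} [BEq β] (f : α → List β) (P : List α) (v : β) :
    (P.flatMap f).count v = (P.map (fun p => (f p).count v)).sum := by
  induction P with
  | nil => simp
  | cons x P ih => simp [List.flatMap_cons, List.count_append, ih]

theorem pv_sum_flatMap {α β : Type} (g : α → List β) (h : β → Int) (l : List α) :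
    ((l.flatMap g).map h).sum = (l.map (fun a => ((g a).map h).sum)).sum := by
  induction l with
  | nil => simp
  | cons x l ih => simp [List.flatMap_cons, ih]

theorem pv_sum_pt {β : Type} [DecidableEq β] (M : List β) (x : β) (c : β → Int)
    (hn : M.Nodup) (hx : x ∈ M) :
    (M.map (fun u => if u = x then c u else 0)).sum = c x := by
  induction M with
  | nil => simp at hx
  | cons u M ih =>
      rcases List.mem_cons.1 hx with rfl | hx'
      · have : ∀ y ∈ M, (if y = x then c y else 0) = 0 := by
          intro y hy
          have : y ≠ x := by rintro rfl; exact (List.nodup_cons.1 hn).1 hy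
          simp [this]
        simp [List.map_cons, List.sum_cons, List.map_congr_left this]
      · have hux : u ≠ x := by rintro rfl; exact (List.nodup_cons.1 hn).1 hx'
        simp [List.map_cons, List.sum_cons, hux, ih hn.of_cons hx']

theorem pv_sumc (l : List Int) (h : Int → Int) :
    (l.map h).sum = ((PySem.Set.ofList l).map (fun u => (l.count u : Int) * h u)).sum := by
  induction l using List.reverseRecOn with
  | nil => simp
  | append_singleton l x ih =>
      rw [List.map_append, List.sum_append, List.map_singleton, List.sum_singleton,
        PySem.Set.ofList_append_singleton]
      by_cases hx : x ∈ PySem.Set.ofList l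
      · rw [PySem.Set.add_of_mem hx]
        have hcnt : ∀ u, ((l ++ [x]).count u : Int) = (l.count u : Int) + (if u = x then 1 else 0) := by
          intro u
          rw [List.count_append]
          by_cases hux : u = x
          · simp [hux]
          · rw [List.count_singleton]
            rw [if_neg (by simp; exact fun h => hux h.symm : ¬ (x == u) = true), if_neg hux]
            simp
        have : ((PySem.Set.ofList l).map (fun u => ((l ++ [x]).count u : Int) * h u)).sum
            = ((PySem.Set.ofList l).map (fun u => (l.count u : Int) * h u)).sum
              + ((PySem.Set.ofList l).map (fun u => if u = x then h u else 0)).sum := by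
          rw [← List.sum_map_add]
          apply congrArg
          apply List.map_congr_left
          intro u _
          rw [hcnt u]
          by_cases hux : u = x
          · simp [hux]; ring
          · simp [hux]
        rw [this, pv_sum_pt _ x _ (PySem.Set.nodup_ofList l) hx, ih]
      · rw [PySem.Set.add_of_not_mem hx, List.map_append, List.sum_append,
          List.map_singleton, List.sum_singleton]
        have hxl : x ∉ l := fun hc => hx ((PySem.Set.mem_ofList _ _).2 hc)
        have h1 : ((PySem.Set.ofList l).map (fun u => ((l ++ [x]).count u : Int) * h u)).sum
            = ((PySem.Set.ofList l).map (fun u => (l.count u : Int) * h u)).sum := by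
          apply congrArg
          apply List.map_congr_left
          intro u hu
          have hux : u ≠ x := by
            rintro rfl; exact hxl ((PySem.Set.mem_ofList _ _).1 hu)
          rw [List.count_append, List.count_singleton]
          simp [Ne.symm hux]
        rw [h1, ih]
        have : ((l ++ [x]).count x : Int) = (l.count x : Int) + 1 := by
          simp [List.count_append]
        rw [this]
        simp [List.count_eq_zero_of_not_mem hxl]
theorem pv_getD_modloop (L : List Int) (w : Int) (d : PySem.Dict Int Int) (v : Int) :
    (L.foldl (fun d l => d.modify l 0 (· + w)) d).getD v 0
      = d.getD v 0 + w * (L.count v : Int) := by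
  induction L generalizing d with
  | nil => simp
  | cons x L ih =>
      rw [List.foldl_cons, ih, PySem.Dict.getD_modify, List.count_cons]
      by_cases hvx : v = x
      · rw [if_pos hvx, hvx]
        simp
        ring
      · rw [if_neg hvx, if_neg (by simp; exact fun h => hvx h.symm)]
        simp

theorem pv_nest {α κ ν : Type} [BEq κ] (X Y : List α) (F : PySem.Dict κ ν → α → α → PySem.Dict κ ν)
    (d : PySem.Dict κ ν) :
    X.foldl (fun d a => Y.foldl (fun d b => F d a b) d) d
      = (X.flatMap (fun a => Y.map (fun b => (a, b)))).foldl (fun d p => F d p.1 p.2) d := by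
  induction X generalizing d with
  | nil => simp
  | cons x X ih =>
      rw [List.foldl_cons, List.flatMap_cons, List.foldl_append, List.foldl_map, ih]

theorem pvA_keys (r : Int × Int → List Int) (P : List (Int × Int)) (d : PySem.Dict Int Int) :
    (P.foldl (fun d p => (r p).foldl (fun d l => d.modify l 0 (· + 1)) d) d).keys
      = PySem.Set.update d.keys (P.flatMap r) := by
  induction P generalizing d with
  | nil => simp [PySem.Set.update]
  | cons p P ih =>
      rw [List.foldl_cons, ih, List.flatMap_cons, PySem.Set.update_append,
        PySem.Dict.keys_foldl_modify]

theorem pvA_getD (r : Int × Int → List Int) (P : List (Int × Int)) (d : PySem.Dict Int Int) (v : Int) :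
    (P.foldl (fun d p => (r p).foldl (fun d l => d.modify l 0 (· + 1)) d) d).getD v 0
      = d.getD v 0 + ((P.flatMap r).count v : Int) := by
  induction P generalizing d with
  | nil => simp
  | cons p P ih =>
      rw [List.foldl_cons, ih, PySem.Dict.getD_foldl_modify_add_one, List.flatMap_cons,
        List.count_append]
      push_cast
      ring

theorem pvB_keys (r : Int × Int → List Int) (m : Int × Int → Int) (P : List (Int × Int))
    (d : PySem.Dict Int Int) :
    (P.foldl (fun d p => (r p).foldl (fun d l => d.modify l 0 (· + m p)) d) d).keys
      = PySem.Set.update d.keys (P.flatMap r) := by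
  induction P generalizing d with
  | nil => simp [PySem.Set.update]
  | cons p P ih =>
      rw [List.foldl_cons, ih, List.flatMap_cons, PySem.Set.update_append,
        PySem.Dict.keys_foldl_modify]

theorem pvB_getD (r : Int × Int → List Int) (m : Int × Int → Int) (P : List (Int × Int))
    (d : PySem.Dict Int Int) (v : Int) :
    (P.foldl (fun d p => (r p).foldl (fun d l => d.modify l 0 (· + m p)) d) d).getD v 0
      = d.getD v 0 + (P.map (fun p => m p * ((r p).count v : Int))).sum := by
  induction P generalizing d with
  | nil => simp
  | cons p P ih =>
      rw [List.foldl_cons, ih, pv_getD_modloop, List.map_cons, List.sum_cons]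
      ring

theorem pv_cast_sum {α : Type} (P : List α) (f : α → Nat) :
    (((P.map f).sum : Nat) : Int) = (P.map (fun p => (f p : Int))).sum := by
  induction P with
  | nil => simp
  | cons x P ih => simp [ih]

theorem pv_sum_mul_left {α : Type} (l : List α) (c : Int) (f : α → Int) :
    (l.map (fun x => c * f x)).sum = c * (l.map f).sum := by
  induction l with
  | nil => simp
  | cons x l ih => simp [ih, mul_add]


-- ===== VERDICT (by name: the statement is the Claim_ definition above) =====
theorem make_dict_irreps_mult_spec : Claim_equal_make_dict_irreps_mult := by
  intro degrees max_degree _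
  unfold Spec_make_dict_irreps_mult make_dict_irreps_mult make_dict_irreps_mult_alt
  simp only []
  set r : Int × Int → List Int := fun p => pvRng max_degree p.1 p.2 with hr
  set U : List Int := PySem.Set.ofList degrees with hU
  -- rewrite B's nested loop into a loop over the pair list
  rw [pv_nest]
  set cnt : PySem.Dict Int Int := PySem.Dict.counter degrees with hcnt
  have hkc : cnt.keys = U := PySem.Dict.keys_counter degrees
  rw [hkc]
  set dA : PySem.Dict Int Int :=
    (pvPairs degrees).foldl
      (fun d p => (pvRng max_degree p.1 p.2).foldl (fun d l => d.modify l 0 (· + 1)) d)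
      PySem.Dict.empty with hdA
  set dB : PySem.Dict Int Int :=
    (pvPairs U).foldl
      (fun d p => (pvRng max_degree p.1 p.2).foldl
        (fun d l => d.modify l 0 (· + cnt.getD p.1 0 * cnt.getD p.2 0)) d)
      PySem.Dict.empty with hdB
  -- keys
  have hKA : dA.keys = PySem.Set.ofList ((pvPairs degrees).flatMap r) := by
    rw [hdA, pvA_keys (r := r), PySem.Dict.keys_empty, PySem.Set.update_nil_left]
  have hKB : dB.keys = PySem.Set.ofList ((pvPairs U).flatMap r) := by
    rw [hdB, pvB_keys (r := r) (m := fun p => cnt.getD p.1 0 * cnt.getD p.2 0),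
      PySem.Dict.keys_empty, PySem.Set.update_nil_left]
  have hofl : ∀ (f : Int × Int → List Int) (xs : List (Int × Int)),
      PySem.Set.ofList (xs.flatMap f) = pvSU f xs PySem.Set.empty := by
    intro f xs
    rw [pvSU_eq_update, ← PySem.Set.update_nil_left]
    rfl
  have hkeys : dA.keys = dB.keys := by
    rw [hKA, hKB, hofl, hofl, pvSU_ofList, pv_ofList_pairs]
  -- values
  have hval : ∀ v, dA.getD v 0 = dB.getD v 0 := by
    intro v
    rw [hdA, hdB, pvA_getD (r := r), pvB_getD (r := r)
        (m := fun p => cnt.getD p.1 0 * cnt.getD p.2 0),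
      PySem.Dict.getD_empty, zero_add, zero_add]
    have hm : ∀ p : Int × Int, cnt.getD p.1 0 * cnt.getD p.2 0
        = (degrees.count p.1 : Int) * (degrees.count p.2 : Int) := by
      intro p
      rw [hcnt, PySem.Dict.getD_counter, PySem.Dict.getD_counter]
    set g : Int → Int → Int := fun a b => ((r (a, b)).count v : Int) with hg
    have hA : (((pvPairs degrees).flatMap r).count v : Int)
        = (degrees.map (fun a => (degrees.map (fun b => g a b)).sum)).sum := by
      rw [pv_count_flatMap, pv_cast_sum, pvPairs]
      rw [show ((degrees.flatMap fun a => degrees.map fun b => (a, b)).map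
            fun p => ((r p).count v : Int))
          = ((degrees.flatMap fun a => degrees.map fun b => (a, b)).map
            fun p => g p.1 p.2) from rfl]
      have := pv_sum_flatMap (fun a => degrees.map (fun b => (a, b)))
        (fun p : Int × Int => g p.1 p.2) degrees
      rw [this]
      congr 1
      apply List.map_congr_left
      intro a _
      rw [List.map_map]
      rfl
    have hB : ((pvPairs U).map (fun p =>
          (cnt.getD p.1 0 * cnt.getD p.2 0) * ((r p).count v : Int))).sum
        = (U.map (fun a => (degrees.count a : Int)
            * (U.map (fun b => (degrees.count b : Int) * g a b)).sum)).sum := by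
      rw [show ((pvPairs U).map (fun p =>
            (cnt.getD p.1 0 * cnt.getD p.2 0) * ((r p).count v : Int)))
          = ((pvPairs U).map (fun p =>
            ((degrees.count p.1 : Int) * (degrees.count p.2 : Int)) * g p.1 p.2)) by
        apply List.map_congr_left
        intro p _
        rw [hm]]
      rw [pvPairs]
      rw [pv_sum_flatMap (fun a => U.map (fun b => (a, b)))
        (fun p : Int × Int => ((degrees.count p.1 : Int) * (degrees.count p.2 : Int)) * g p.1 p.2) U]
      apply congrArg
      apply List.map_congr_left
      intro a _
      rw [List.map_map]
      have : (U.map ((fun p : Int × Int =>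
            ((degrees.count p.1 : Int) * (degrees.count p.2 : Int)) * g p.1 p.2)
              ∘ fun b => (a, b)))
          = U.map (fun b => (degrees.count a : Int)
              * ((degrees.count b : Int) * g a b)) := by
        apply List.map_congr_left
        intro b _
        simp [Function.comp]
        ring
      rw [this, pv_sum_mul_left]
    rw [hA, hB]
    rw [pv_sumc degrees (fun a => (degrees.map (fun b => g a b)).sum)]
    apply congrArg
    apply List.map_congr_left
    intro a _
    rw [pv_sumc degrees (fun b => g a b)]
  -- assemble items
  have hnA : dA.keys.Nodup := by rw [hKA]; exact PySem.Set.nodup_ofList _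
  have hnB : dB.keys.Nodup := by rw [hKB]; exact PySem.Set.nodup_ofList _
  have hitems : dA.items = dB.items := by
    rw [PySem.Dict.items_eq_map_keys dA hnA 0, PySem.Dict.items_eq_map_keys dB hnB 0, hkeys]
    apply List.map_congr_left
    intro k _
    rw [hval k]
  exact hitems
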